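-- pv_equiv track=rewrite | github.com/Qubit-Fernand/NCC-Trotter-Compensation | old_version_and_rejection/NCC_channel_rejection.py | iter_compositions
-- ===== SOURCE A (Python) =====
-- def iter_compositions(total, parts, lower, upper):
--     if parts == 1:
--         if lower <= total <= upper:
--             yield (total,)
--         return
--     min_rest = (parts - 1) * lower
--     max_rest = (parts - 1) * upper
--     start = max(lower, total - max_rest)
--     stop = min(upper, total - min_rest)
--     for first in range(start, stop + 1):
--         for rest in iter_compositions(total - first, parts - 1, lower, upper):
--             yield (first,) + rest
-- ===== SOURCE B (Python) =====
-- def iter_compositions(total, parts, lower, upper):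
--     # Breadth-first: grow all prefixes level by level instead of recursing.
--     level = [((), total)]
--     for i in range(parts - 1, 0, -1):
--         if not level:
--             break
--         new_level = []
--         for prefix, t in level:
--             start = max(lower, t - i * upper)
--             stop = min(upper, t - i * lower)
--             for first in range(start, stop + 1):
--                 new_level.append((prefix + (first,), t - first))
--         level = new_level
--     for prefix, t in level:
--         if lower <= t <= upper:
--             yield prefix + (t,)
-- ===== Notes on version B (the rewrite author's own statement) =====
-- stated objective: alternative
-- what changed: Replaces A's depth-first recursive generator by a non-recursive breadth-first expansion: a worklist of (prefix, remaining) pairs is grown one level per part, then the last part is filled in by a bounds check.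
-- outside the precondition, e.g. on iter_compositions(1, 0, 0, 2): A returns [], B returns [(1,)]
import Mathlib
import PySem

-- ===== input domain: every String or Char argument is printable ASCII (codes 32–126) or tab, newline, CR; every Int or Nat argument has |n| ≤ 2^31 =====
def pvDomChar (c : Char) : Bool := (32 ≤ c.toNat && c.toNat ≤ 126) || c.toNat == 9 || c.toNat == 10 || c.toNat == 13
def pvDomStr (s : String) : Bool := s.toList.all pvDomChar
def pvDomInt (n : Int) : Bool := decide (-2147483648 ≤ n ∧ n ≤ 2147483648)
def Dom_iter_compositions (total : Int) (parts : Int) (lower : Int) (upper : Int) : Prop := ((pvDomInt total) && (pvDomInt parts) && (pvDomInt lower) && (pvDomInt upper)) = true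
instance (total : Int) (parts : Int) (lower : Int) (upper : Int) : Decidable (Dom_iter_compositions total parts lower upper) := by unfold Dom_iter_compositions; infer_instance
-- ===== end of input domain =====

-- B replaces A's depth-first recursive generator by a non-recursive breadth-first
-- level-by-level expansion of (prefix, remaining) pairs (objective: alternative).

-- ===== PORT A =====
-- A is a recursive generator on `parts`; the port carries a fuel argument
-- (parts.toNat + 1 at the top level), which is sufficient for every input in
-- Pre_ (parts ≥ 1): each recursive call decreases parts by exactly 1.
def iterCompA (fuel : Nat) (total : Int) (parts : Int) (lower : Int) (upper : Int) : List (List Int) :=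
  match fuel with
  | 0 => []
  | fuel + 1 =>
    if parts = 1 then
      if lower ≤ total ∧ total ≤ upper then [[total]] else []
    else
      let min_rest := (parts - 1) * lower
      let max_rest := (parts - 1) * upper
      let start := max lower (total - max_rest)
      let stop := min upper (total - min_rest)
      (PySem.List.pyRange start (stop + 1) 1).flatMap (fun first =>
        (iterCompA fuel (total - first) (parts - 1) lower upper).map (fun rest => first :: rest))

def iter_compositions (total : Int) (parts : Int) (lower : Int) (upper : Int) : List (List Int) :=
  iterCompA (parts.toNat + 1) total parts lower upper

-- ===== PORT B =====
-- one BFS level: expand every (prefix, remaining) pair by all admissible next parts,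
-- with i parts still to be placed after this one
def iterCompBStep (lower : Int) (upper : Int) (i : Int) (level : List (List Int × Int)) : List (List Int × Int) :=
  level.flatMap (fun pt =>
    let start := max lower (pt.2 - i * upper)
    let stop := min upper (pt.2 - i * lower)
    (PySem.List.pyRange start (stop + 1) 1).map (fun first => (pt.1 ++ [first], pt.2 - first)))

-- the level-growing loop `for i in range(parts-1, 0, -1)` with B's early exit once
-- the worklist is empty; Python's range is lazy, so i counts down directly
def iterCompBLoop (lower : Int) (upper : Int) (i : Int) (level : List (List Int × Int)) : List (List Int × Int) :=
  if i ≤ 0 then level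
  else if level = [] then level
  else iterCompBLoop lower upper (i - 1) (iterCompBStep lower upper i level)
termination_by i.toNat
decreasing_by omega

def iter_compositions_alt (total : Int) (parts : Int) (lower : Int) (upper : Int) : List (List Int) :=
  let level := iterCompBLoop lower upper (parts - 1) [(([] : List Int), total)]
  level.flatMap (fun pt => if lower ≤ pt.2 ∧ pt.2 ≤ upper then [pt.1 ++ [pt.2]] else [])

-- ===== PRECONDITION & SPEC =====
-- Pre_ excludes (a) parts ≤ 0 (not a meaningful number of parts): there A either
-- recurses forever (RecursionError) or returns [] only because its first range
-- happens to be empty, an accident of the implementation; and (b) parts > 900 with a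
-- nonempty first range, where A's recursion (depth = parts whenever the first range is
-- nonempty) hits CPython's recursion limit and raises RecursionError (900 is a safe
-- margin below the default limit of 1000, so a thin band of still-returning inputs is
-- excluded with it).
def Pre_iter_compositions (total : Int) (parts : Int) (lower : Int) (upper : Int) : Prop :=
  1 ≤ parts ∧ (parts ≤ 900 ∨ min upper (total - (parts - 1) * lower) < max lower (total - (parts - 1) * upper))
instance (total : Int) (parts : Int) (lower : Int) (upper : Int) : Decidable (Pre_iter_compositions total parts lower upper) := by unfold Pre_iter_compositions; infer_instance
def pvWitness_iter_compositions : Int × Int × Int × Int := (5, 3, 1, 3)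

def Spec_iter_compositions (total : Int) (parts : Int) (lower : Int) (upper : Int) (out : List (List Int)) : Prop := out = iter_compositions_alt total parts lower upper
instance (total : Int) (parts : Int) (lower : Int) (upper : Int) (out : List (List Int)) : Decidable (Spec_iter_compositions total parts lower upper out) := by unfold Spec_iter_compositions; infer_instance

-- ===== CLAIM (what is proved, stated in full; the proofs are below) =====
def Claim_equal_iter_compositions : Prop := ∀ (total : Int) (parts : Int) (lower : Int) (upper : Int), Dom_iter_compositions total parts lower upper → Pre_iter_compositions total parts lower upper → Spec_iter_compositions total parts lower upper (iter_compositions total parts lower upper)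

-- ===== LEMMAS AND PROOFS =====

-- the key BFS/DFS bridge: folding B's expansion over the countdown [p-1, …, 1]
-- starting from any level computes, for each pair, A's recursive result appended
lemma bfs_eq_dfs (lower upper : Int) (n : Nat) :
    ∀ (parts : Int) (fuel : Nat) (L : List (List Int × Int)),
    parts - 1 = (n : Int) → parts.toNat ≤ fuel →
    (iterCompBLoop lower upper (parts - 1) L).flatMap
      (fun pt => if lower ≤ pt.2 ∧ pt.2 ≤ upper then [pt.1 ++ [pt.2]] else []) =
    L.flatMap (fun pt => (iterCompA fuel pt.2 parts lower upper).map (fun c => pt.1 ++ c)) := by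
  induction n with
  | zero =>
    intro parts fuel L hn hf
    have hp1 : parts = 1 := by omega
    subst hp1
    rw [iterCompBLoop.eq_def, if_pos (by norm_num : (1:Int) - 1 ≤ 0)]
    obtain ⟨f, rfl⟩ : ∃ f, fuel = f + 1 := ⟨fuel - 1, by omega⟩
    congr 1
    funext pt
    simp only [iterCompA]
    by_cases h : lower ≤ pt.2 ∧ pt.2 ≤ upper
    · simp [h]
    · simp [h]
  | succ m ih =>
    intro parts fuel L hn hf
    obtain ⟨f, rfl⟩ : ∃ f, fuel = f + 1 := ⟨fuel - 1, by omega⟩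
    have hp : 2 ≤ parts := by omega
    rw [iterCompBLoop.eq_def, if_neg (by omega : ¬ parts - 1 ≤ 0)]
    by_cases hL : L = []
    · simp [hL]
    simp only [if_neg hL]
    have hstep : (parts - 1) - 1 = (m : Int) := by omega
    rw [ih (parts - 1) f (iterCompBStep lower upper (parts - 1) L) hstep (by omega)]
    simp only [iterCompBStep, List.flatMap_assoc, List.flatMap_map]
    -- both sides are flatMaps over L; show the expansions agree pairwise
    congr 1
    funext pt
    simp only [iterCompA, if_neg (show ¬ parts = 1 by omega)]
    rw [List.map_flatMap]
    congr 1
    funext first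
    simp [List.map_map, Function.comp_def, List.append_assoc]

theorem iter_compositions_spec : Claim_equal_iter_compositions := by
  intro total parts lower upper _ hpre
  have hp : 1 ≤ parts := hpre.1
  unfold Spec_iter_compositions iter_compositions iter_compositions_alt
  rw [bfs_eq_dfs lower upper (parts - 1).toNat parts (parts.toNat + 1)
      [(([] : List Int), total)] (by omega) (by omega)]
  simp
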